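-- pv_equiv track=rewrite | github.com/mrbaker1917/AoC2025 | day3.py | find_second_highest
-- ===== SOURCE A (Python) =====
-- def find_second_highest(s, highest, index):
--     if index != len(s)-1:
--         for j in range(9, -1, -1):
--             rest = s[index+1:]
--             if rest.find(str(j)) != -1:
--                 return j, (rest.find(str(j)) + index+1)
--     else:
--         for j in range(highest-1, -1, -1):
--             if s.find(str(j)) != -1:
--                 return j, s.find(str(j))
-- ===== SOURCE B (Python) =====
-- def find_second_highest(s, highest, index):
--     if index != len(s) - 1:
--         rest = s[index + 1:]
--         best = None
--         for i, ch in enumerate(rest):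
--             if '0' <= ch <= '9':
--                 d = ord(ch) - 48
--                 if best is None or d > best[0]:
--                     best = (d, i)
--         if best is None:
--             return None
--         return best[0], best[1] + index + 1
--     else:
--         best = None
--         for i, ch in enumerate(s):
--             if '0' <= ch <= '9':
--                 d = ord(ch) - 48
--                 if d < highest and (best is None or d > best[0]):
--                     best = (d, i)
--         return best
-- ===== Notes on version B (the rewrite author's own statement) =====
-- stated objective: alternative
-- what changed: Replaces the descending digit-by-digit str.find probes (and the range(highest-1,-1,-1) substring search) with a single linear scan over the characters tracking the maximum digit and its first position.
-- intended difference: When index == len(s)-1 and s contains two adjacent digits forming a two-digit number below highest, A's substring search returns that multi-digit number (e.g. A('10',11,1) = (10,0)) instead of a digit, while B returns the largest single digit below highest with its first position (B('10',11,1) = (1,0)), which matches the function's purpose of finding the second-highest digit. — e.g. on find_second_highest("10", 11, 1): A returns some (10, 0), B returns some (1, 0)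
import Mathlib
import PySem

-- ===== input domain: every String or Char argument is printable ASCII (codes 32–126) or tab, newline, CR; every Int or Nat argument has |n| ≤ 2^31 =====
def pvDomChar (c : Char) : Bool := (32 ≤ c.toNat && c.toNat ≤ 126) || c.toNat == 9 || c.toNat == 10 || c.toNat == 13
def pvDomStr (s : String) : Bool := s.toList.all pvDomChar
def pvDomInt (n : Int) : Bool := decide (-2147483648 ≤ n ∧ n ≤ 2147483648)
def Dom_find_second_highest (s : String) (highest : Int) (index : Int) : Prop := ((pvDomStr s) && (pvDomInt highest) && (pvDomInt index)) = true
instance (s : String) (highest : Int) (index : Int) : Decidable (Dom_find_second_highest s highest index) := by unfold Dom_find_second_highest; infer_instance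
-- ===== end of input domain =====

-- B replaces A's digit-by-digit str.find probes with one linear scan; on the else branch with a
-- two-digit number below `highest` present, B returns the largest single digit (stated as D_).


-- ===== PORT A =====
-- for j in range(9,-1,-1): rest = s[index+1:]; if rest.find(str(j)) != -1: return j, rest.find(str(j)) + index+1
def fshLoop1 (s : String) (index : Int) : List Int → Option (Int × Int)
  | [] => none
  | j :: js =>
    let rest := PySem.Str.slice s (some (index + 1)) none
    if PySem.Str.find rest (PySem.Int.toStr j) ≠ -1 then
      some (j, PySem.Str.find rest (PySem.Int.toStr j) + index + 1)
    else fshLoop1 s index js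

-- for j in range(highest-1,-1,-1): if s.find(str(j)) != -1: return j, s.find(str(j))
def fshLoop2 (s : String) : List Int → Option (Int × Int)
  | [] => none
  | j :: js =>
    if PySem.Str.find s (PySem.Int.toStr j) ≠ -1 then
      some (j, PySem.Str.find s (PySem.Int.toStr j))
    else fshLoop2 s js

def find_second_highest (s : String) (highest : Int) (index : Int) : Option (Int × Int) :=
  if index ≠ PySem.Str.len s - 1 then
    fshLoop1 s index (PySem.List.pyRange 9 (-1) (-1))
  else
    fshLoop2 s (PySem.List.pyRange (highest - 1) (-1) (-1))

-- ===== PORT B =====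
-- loop body of B's first scan: if '0' <= ch <= '9': d = ord(ch)-48; if best is None or d > best[0]: best = (d, i)
def fshBest1 (best : Option (Int × Int)) (p : Int × Char) : Option (Int × Int) :=
  if '0' ≤ p.2 ∧ p.2 ≤ '9' then
    let d : Int := (p.2.toNat : Int) - 48
    match best with
    | none => some (d, p.1)
    | some b => if d > b.1 then some (d, p.1) else some b
  else best

-- loop body of B's second scan: additionally requires d < highest
def fshBest2 (h : Int) (best : Option (Int × Int)) (p : Int × Char) : Option (Int × Int) :=
  if '0' ≤ p.2 ∧ p.2 ≤ '9' then
    let d : Int := (p.2.toNat : Int) - 48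
    match best with
    | none => if d < h then some (d, p.1) else none
    | some b => if d < h ∧ d > b.1 then some (d, p.1) else some b
  else best

def find_second_highest_alt (s : String) (highest : Int) (index : Int) : Option (Int × Int) :=
  if index ≠ PySem.Str.len s - 1 then
    let rest := PySem.Str.slice s (some (index + 1)) none
    match (PySem.List.enumerate rest.toList 0).foldl fshBest1 none with
    | none => none
    | some b => some (b.1, b.2 + index + 1)
  else
    (PySem.List.enumerate s.toList 0).foldl (fshBest2 highest) none

-- ===== PRECONDITION & SPEC =====
-- D_: index = len(s)-1 and s has two adjacent digits, the first nonzero, whose two-digit value is < highest.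
-- On these inputs A returns that multi-digit number found by substring search (e.g. A "10" 11 1 = (10,0)),
-- while B returns the largest single digit below highest with its first position, the intended value.
def fshHasPair (cs : List Char) (h : Int) : Bool :=
  (cs.zip cs.tail).any (fun p =>
    decide ('1' ≤ p.1 ∧ p.1 ≤ '9' ∧ '0' ≤ p.2 ∧ p.2 ≤ '9' ∧
      10 * ((p.1.toNat : Int) - 48) + ((p.2.toNat : Int) - 48) < h))

def D_find_second_highest (s : String) (highest : Int) (index : Int) : Prop :=
  index = PySem.Str.len s - 1 ∧ fshHasPair s.toList highest = true
instance (s : String) (highest : Int) (index : Int) : Decidable (D_find_second_highest s highest index) := by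
  unfold D_find_second_highest; infer_instance

def Spec_find_second_highest (s : String) (highest : Int) (index : Int) (out : Option (Int × Int)) : Prop :=
  ¬ D_find_second_highest s highest index → out = find_second_highest_alt s highest index
instance (s : String) (highest : Int) (index : Int) (out : Option (Int × Int)) : Decidable (Spec_find_second_highest s highest index out) := by
  unfold Spec_find_second_highest; infer_instance

def pvDiffWitness_find_second_highest : String × Int × Int := ("10", 11, 1)
def pvDiffWitnessOut_find_second_highest : (Option (Int × Int)) × (Option (Int × Int)) :=
  (some (10, 0), some (1, 0))

-- ===== CLAIM (what is proved, stated in full; the proofs are below) =====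
def Claim_unchanged_find_second_highest : Prop := ∀ (s : String) (highest : Int) (index : Int), Dom_find_second_highest s highest index → Spec_find_second_highest s highest index (find_second_highest s highest index)
def Claim_changed_find_second_highest : Prop := Dom_find_second_highest (pvDiffWitness_find_second_highest.1) (pvDiffWitness_find_second_highest.2.1) (pvDiffWitness_find_second_highest.2.2) ∧ D_find_second_highest (pvDiffWitness_find_second_highest.1) (pvDiffWitness_find_second_highest.2.1) (pvDiffWitness_find_second_highest.2.2) ∧ find_second_highest (pvDiffWitness_find_second_highest.1) (pvDiffWitness_find_second_highest.2.1) (pvDiffWitness_find_second_highest.2.2) = pvDiffWitnessOut_find_second_highest.1 ∧ find_second_highest_alt (pvDiffWitness_find_second_highest.1) (pvDiffWitness_find_second_highest.2.1) (pvDiffWitness_find_second_highest.2.2) = pvDiffWitnessOut_find_second_highest.2 ∧ pvDiffWitnessOut_find_second_highest.1 ≠ pvDiffWitnessOut_find_second_highest.2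
def Claim_exact_find_second_highest : Prop := ∀ (s : String) (highest : Int) (index : Int), Dom_find_second_highest s highest index → D_find_second_highest s highest index → find_second_highest s highest index ≠ find_second_highest_alt s highest index

-- ===== LEMMAS AND PROOFS =====

-- digit value of a char, spec side
def fshVal (c : Char) : Int := (c.toNat : Int) - 48
abbrev fshDigit (c : Char) : Prop := '0' ≤ c ∧ c ≤ '9'

-- canonical "max digit < h with first position" over a char list starting at position i
def fshSpec (h : Int) : List Char → Int → Option (Int × Int)
  | [], _ => none
  | c :: cs, i =>
    let r := fshSpec h cs (i + 1)
    if fshDigit c ∧ fshVal c < h then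
      match r with
      | none => some (fshVal c, i)
      | some b => if b.1 ≤ fshVal c then some (fshVal c, i) else some b
    else r

def fshCombine (x y : Option (Int × Int)) : Option (Int × Int) :=
  match x, y with
  | none, y => y
  | some b, none => some b
  | some b, some m => if m.1 > b.1 then some m else some b

lemma char_le_iff (a b : Char) : a ≤ b ↔ a.toNat ≤ b.toNat := by
  rw [Char.le_def, UInt32.le_iff_toNat_le]; rfl

lemma char_eq_of_toNat_eq {a b : Char} (h : a.toNat = b.toNat) : a = b := by
  apply Char.ext; exact UInt32.toNat_inj.mp h

lemma fshVal_bounds {c : Char} (h : fshDigit c) : 0 ≤ fshVal c ∧ fshVal c ≤ 9 := by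
  obtain ⟨h1, h2⟩ := h
  rw [char_le_iff] at h1 h2
  have e0 : ('0' : Char).toNat = 48 := rfl
  have e9 : ('9' : Char).toNat = 57 := rfl
  unfold fshVal; omega

-- fshSpec results are digits below h
lemma fshSpec_bounds (h : Int) (cs : List Char) (i : Int) (b : Int × Int)
    (hb : fshSpec h cs i = some b) : 0 ≤ b.1 ∧ b.1 ≤ 9 ∧ b.1 < h := by
  induction cs generalizing i b with
  | nil => simp [fshSpec] at hb
  | cons c cs ih =>
    simp only [fshSpec] at hb
    by_cases hd : fshDigit c ∧ fshVal c < h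
    · rw [if_pos hd] at hb
      have hv := fshVal_bounds hd.1
      have hv2 := hd.2
      cases hr : fshSpec h cs (i + 1) with
      | none =>
        rw [hr] at hb
        simp only [Option.some_inj] at hb
        have : b.1 = fshVal c := by rw [← hb]
        omega
      | some m =>
        rw [hr] at hb
        have hm := ih (i + 1) m hr
        have hred : (match some m with
            | none => some (fshVal c, i)
            | some b => if b.1 ≤ fshVal c then some (fshVal c, i) else some b)
            = if m.1 ≤ fshVal c then some (fshVal c, i) else some m := rfl
        rw [hred] at hb
        split_ifs at hb with ht
        · simp only [Option.some_inj] at hb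
          have hbv : b.1 = fshVal c := by rw [← hb]
          omega
        · simp only [Option.some_inj] at hb
          subst hb; exact hm
    · rw [if_neg hd] at hb; exact ih (i + 1) b hb

lemma fshSpec_nonpos (h : Int) (cs : List Char) (i : Int) (hh : h ≤ 0) :
    fshSpec h cs i = none := by
  cases hr : fshSpec h cs i with
  | none => rfl
  | some b => have := fshSpec_bounds h cs i b hr; omega

-- B's second loop body is "combine with the candidate"
lemma fshBest2_eq_combine (h : Int) (acc : Option (Int × Int)) (p : Int × Char) :
    fshBest2 h acc p =
      if fshDigit p.2 ∧ fshVal p.2 < h then fshCombine acc (some (fshVal p.2, p.1)) else acc := by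
  by_cases hd : '0' ≤ p.2 ∧ p.2 ≤ '9'
  · by_cases hv : fshVal p.2 < h
    · rw [if_pos ⟨hd, hv⟩]
      cases acc with
      | none =>
        simp only [fshBest2, fshCombine]
        rw [if_pos hd, if_pos (show ((p.2.toNat : Int) - 48) < h from hv)]
        rfl
      | some b =>
        simp only [fshBest2, fshCombine]
        rw [if_pos hd]
        by_cases hgt : ((p.2.toNat : Int) - 48) > b.1
        · rw [if_pos ⟨show ((p.2.toNat : Int) - 48) < h from hv, hgt⟩,
            if_pos (show fshVal p.2 > b.1 from hgt)]
          rfl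
        · rw [if_neg (fun hcon => hgt hcon.2), if_neg (show ¬ fshVal p.2 > b.1 from hgt)]
    · rw [if_neg (fun hcon => hv hcon.2)]
      cases acc with
      | none =>
        simp only [fshBest2]
        rw [if_pos hd, if_neg (show ¬ ((p.2.toNat : Int) - 48) < h from hv)]
      | some b =>
        simp only [fshBest2]
        rw [if_pos hd, if_neg (fun hcon => hv hcon.1)]
  · rw [if_neg (fun hcon => hd hcon.1)]
    cases acc <;> · simp only [fshBest2]; rw [if_neg hd]

lemma fshCombine_assoc (acc : Option (Int × Int)) (x : Int × Int) (r : Option (Int × Int)) :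
    fshCombine (fshCombine acc (some x)) r =
      fshCombine acc (match r with
        | none => some x
        | some m => if m.1 ≤ x.1 then some x else some m) := by
  cases acc with
  | none =>
    cases r with
    | none => rfl
    | some m =>
      show fshCombine (some x) (some m) = fshCombine none (if m.1 ≤ x.1 then some x else some m)
      by_cases hmx : m.1 ≤ x.1
      · rw [if_pos hmx]
        show (if m.1 > x.1 then some m else some x) = some x
        rw [if_neg (by omega)]
      · rw [if_neg hmx]
        show (if m.1 > x.1 then some m else some x) = some m
        rw [if_pos (by omega)]
  | some b =>
    cases r with
    | none =>
      show fshCombine (fshCombine (some b) (some x)) none = fshCombine (some b) (some x)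
      cases fshCombine (some b) (some x) <;> rfl
    | some m =>
      show fshCombine (if x.1 > b.1 then some x else some b) (some m)
          = fshCombine (some b) (if m.1 ≤ x.1 then some x else some m)
      by_cases hxb : x.1 > b.1
      · rw [if_pos hxb]
        by_cases hmx : m.1 ≤ x.1
        · rw [if_pos hmx]
          show (if m.1 > x.1 then some m else some x) = (if x.1 > b.1 then some x else some b)
          rw [if_neg (by omega), if_pos hxb]
        · rw [if_neg hmx]
          show (if m.1 > x.1 then some m else some x) = (if m.1 > b.1 then some m else some b)
          rw [if_pos (by omega), if_pos (by omega)]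
      · rw [if_neg hxb]
        by_cases hmx : m.1 ≤ x.1
        · rw [if_pos hmx]
          show (if m.1 > b.1 then some m else some b) = (if x.1 > b.1 then some x else some b)
          rw [if_neg (by omega), if_neg hxb]
        · rw [if_neg hmx]

-- B's fold is fshSpec
lemma foldl_fshBest2 (h : Int) (cs : List Char) (i : Int) (acc : Option (Int × Int)) :
    (PySem.List.enumerate cs i).foldl (fshBest2 h) acc = fshCombine acc (fshSpec h cs i) := by
  induction cs generalizing i acc with
  | nil =>
    rw [PySem.List.enumerate_nil]
    cases acc <;> rfl
  | cons c cs ih =>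
    rw [PySem.List.enumerate_cons, List.foldl_cons, ih, fshBest2_eq_combine]
    simp only [fshSpec]
    by_cases hd : fshDigit c ∧ fshVal c < h
    · rw [if_pos hd, if_pos hd, fshCombine_assoc]
    · rw [if_neg hd, if_neg hd]

lemma fshBest1_eq (acc : Option (Int × Int)) (p : Int × Char) :
    fshBest1 acc p = fshBest2 10 acc p := by
  by_cases hd : '0' ≤ p.2 ∧ p.2 ≤ '9'
  · have hv := fshVal_bounds (c := p.2) hd
    unfold fshVal at hv
    cases acc with
    | none =>
      simp only [fshBest1, fshBest2]
      rw [if_pos hd, if_pos hd, if_pos (by omega)]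
    | some b =>
      simp only [fshBest1, fshBest2]
      rw [if_pos hd, if_pos hd]
      by_cases hgt : ((p.2.toNat : Int) - 48) > b.1
      · rw [if_pos hgt, if_pos ⟨by omega, hgt⟩]
      · rw [if_neg hgt, if_neg (by tauto)]
  · simp only [fshBest1, fshBest2]
    rw [if_neg hd, if_neg hd]

-- stepping the threshold down when no digit of value h-1 occurs
lemma fshSpec_step (h : Int) (cs : List Char) (i : Int)
    (hno : ∀ c ∈ cs, fshDigit c → fshVal c ≠ h - 1) :
    fshSpec h cs i = fshSpec (h - 1) cs i := by
  induction cs generalizing i with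
  | nil => rfl
  | cons c cs ih =>
    simp only [fshSpec]
    rw [ih (i + 1) (fun c' hm hd => hno c' (List.mem_cons_of_mem _ hm) hd)]
    by_cases hd : fshDigit c
    · have hne := hno c (by simp) hd
      by_cases hv : fshVal c < h - 1
      · rw [if_pos ⟨hd, by omega⟩, if_pos ⟨hd, hv⟩]
      · rw [if_neg (by rintro ⟨_, h2⟩; omega), if_neg (by tauto)]
    · rw [if_neg (by tauto), if_neg (by tauto)]

-- the maximal digit h-1 is present: fshSpec returns it with its first index
lemma fshSpec_top (h : Int) (c : Char) (hc : fshDigit c) (hv : fshVal c = h - 1) :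
    ∀ cs (i : Int), c ∈ cs → fshSpec h cs i = some (h - 1, i + (cs.idxOf c : Int)) := by
  intro cs
  induction cs with
  | nil => intro i hm; simp at hm
  | cons c' cs ih =>
    intro i hm
    simp only [fshSpec]
    by_cases hcc : c' = c
    · subst hcc
      rw [if_pos ⟨hc, by omega⟩]
      rw [List.idxOf_cons_self]
      cases hr : fshSpec h cs (i + 1) with
      | none => simp [hv]
      | some b =>
        have hbnd := fshSpec_bounds h cs (i + 1) b hr
        have hred : (match some b with
            | none => some (fshVal c', i)
            | some b => if b.1 ≤ fshVal c' then some (fshVal c', i) else some b)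
            = if b.1 ≤ fshVal c' then some (fshVal c', i) else some b := rfl
        rw [hred, if_pos (by omega)]
        simp [hv]
    · have hm' : c ∈ cs := by
        rcases List.mem_cons.mp hm with heq | hmem
        · exact absurd heq.symm hcc
        · exact hmem
      rw [ih (i + 1) hm']
      have hidx : (c' :: cs).idxOf c = cs.idxOf c + 1 := by
        rw [List.idxOf_cons_ne _ (by simpa using hcc)]
      by_cases hd : fshDigit c' ∧ fshVal c' < h
      · have hne : fshVal c' ≠ h - 1 := by
          intro he
          exact hcc (char_eq_of_toNat_eq (by unfold fshVal at he hv; omega))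
        rw [if_pos hd]
        have hred : (match some (h - 1, i + 1 + (cs.idxOf c : Int)) with
            | none => some (fshVal c', i)
            | some b => if b.1 ≤ fshVal c' then some (fshVal c', i) else some b)
            = if (h - 1 : Int) ≤ fshVal c' then some (fshVal c', i)
              else some (h - 1, i + 1 + (cs.idxOf c : Int)) := rfl
        rw [hred, if_neg (by have := hd.2; omega), hidx]
        push_cast
        rw [show i + 1 + (cs.idxOf c : Int) = i + ((cs.idxOf c : Int) + 1) from by ring]
      · rw [if_neg hd, hidx]
        push_cast
        rw [show i + 1 + (cs.idxOf c : Int) = i + ((cs.idxOf c : Int) + 1) from by ring]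

-- find of a single character is idxOf
lemma idxOf_le_of_getElem? (l : List Char) (k : Nat) (c : Char) (h : l[k]? = some c) :
    l.idxOf c ≤ k := by
  induction l generalizing k with
  | nil => simp at h
  | cons x l ih =>
    by_cases hx : x = c
    · subst hx; rw [List.idxOf_cons_self]; omega
    · rw [List.idxOf_cons_ne _ (by simpa using hx)]
      cases k with
      | zero => simp at h; exact absurd h hx
      | succ k => simp only [List.getElem?_cons_succ] at h; have := ih k h; omega

lemma find_singleton (cs : List Char) (c : Char) (hm : c ∈ cs) :
    PySem.Chars.find cs [c] = (cs.idxOf c : Int) := by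
  have hinfix : [c] <:+: cs := by
    obtain ⟨l1, l2, rfl⟩ := List.append_of_mem hm
    exact ⟨l1, l2, by simp⟩
  have hne : PySem.Chars.find cs [c] ≠ -1 := (PySem.Chars.find_ne_neg_one_iff _ _).mpr hinfix
  have h0 : 0 ≤ PySem.Chars.find cs [c] := by
    have := PySem.Chars.neg_one_le_find cs [c]
    omega
  obtain ⟨hpre, hmin⟩ := PySem.Chars.find_spec h0
  set f := (PySem.Chars.find cs [c]).toNat with hf
  have hget : cs[f]? = some c := by
    obtain ⟨t, ht⟩ := hpre
    have hdr : cs.drop f = c :: t := by simpa using ht.symm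
    have hh : (cs.drop f)[0]? = cs[f + 0]? := List.getElem?_drop
    rw [hdr] at hh
    simpa using hh.symm
  have hA : cs.idxOf c ≤ f := idxOf_le_of_getElem? cs f c hget
  have hB : ¬ cs.idxOf c < f := by
    intro hlt
    apply hmin (cs.idxOf c) hlt
    have hlen : cs.idxOf c < cs.length := List.idxOf_lt_length_of_mem hm
    refine ⟨cs.drop (cs.idxOf c + 1), ?_⟩
    rw [List.drop_eq_getElem_cons hlen]
    simp [List.getElem_idxOf hlen]
  omega

-- adjacent pair from positions
lemma pair_mem_zip (cs : List Char) (k : Nat) (a b : Char)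
    (ha : cs[k]? = some a) (hb : cs[k + 1]? = some b) : (a, b) ∈ cs.zip cs.tail := by
  induction cs generalizing k with
  | nil => simp at ha
  | cons x cs ih =>
    cases k with
    | zero =>
      simp only [List.getElem?_cons_zero, Option.some_inj] at ha
      subst ha
      cases cs with
      | nil => simp at hb
      | cons y t =>
        simp only [List.getElem?_cons_succ, List.getElem?_cons_zero, Option.some_inj] at hb
        subst hb
        simp [List.zip]
    | succ k =>
      simp only [List.getElem?_cons_succ] at ha hb
      have hmem := ih k ha hb
      cases cs with
      | nil => simp at ha
      | cons y t =>
        simp only [List.tail_cons] at hmem ⊢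
        rw [List.zip_cons_cons]
        exact List.mem_cons_of_mem _ hmem

lemma zip_mem_pair (cs : List Char) (a b : Char) (h : (a, b) ∈ cs.zip cs.tail) :
    ∃ k : Nat, cs[k]? = some a ∧ cs[k + 1]? = some b := by
  induction cs with
  | nil => simp [List.zip] at h
  | cons x cs ih =>
    cases cs with
    | nil => simp [List.zip] at h
    | cons y t =>
      simp only [List.tail_cons] at h ih
      rw [List.zip_cons_cons, List.mem_cons] at h
      rcases h with heq | h2
      · obtain ⟨rfl, rfl⟩ := Prod.mk.inj heq
        exact ⟨0, by simp, by simp⟩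
      · obtain ⟨k, h1, h2'⟩ := ih h2
        exact ⟨k + 1, by simpa using h1, by simpa using h2'⟩

-- digitChar facts
lemma digitChar_toNat {k : Nat} (hk : k ≤ 9) : (Nat.digitChar k).toNat = 48 + k := by
  interval_cases k <;> decide

lemma digitChar_digit {k : Nat} (hk : k ≤ 9) : fshDigit (Nat.digitChar k) := by
  interval_cases k <;> exact ⟨by decide, by decide⟩

lemma digitChar_ge_one {k : Nat} (h1 : 1 ≤ k) (hk : k ≤ 9) : '1' ≤ Nat.digitChar k := by
  interval_cases k <;> decide

-- Nat.toDigits structure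
lemma toDigitsCore_fuel : ∀ (f n : Nat) (acc : List Char), n < f →
    Nat.toDigitsCore 10 f n acc = Nat.toDigitsCore 10 (n + 1) n acc := by
  intro f
  induction f using Nat.strong_induction_on with
  | _ f ih =>
    intro n acc h
    match f, h with
    | f + 1, h =>
      simp only [Nat.toDigitsCore]
      by_cases h0 : n / 10 = 0
      · simp [h0]
      · simp only [h0, if_false]
        have h10 : 10 ≤ n := by omega
        have hd : n / 10 < n := Nat.div_lt_self (by omega) (by omega)
        rw [ih f (by omega) (n / 10) _ (by omega)]
        rw [ih n (by omega) (n / 10) _ (by omega)]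

lemma toDigitsCore_acc : ∀ (f n : Nat) (acc : List Char),
    Nat.toDigitsCore 10 f n acc = Nat.toDigitsCore 10 f n [] ++ acc := by
  intro f
  induction f with
  | zero => intro n acc; simp [Nat.toDigitsCore]
  | succ f ih =>
    intro n acc
    simp only [Nat.toDigitsCore]
    by_cases h0 : n / 10 = 0
    · simp [h0]
    · simp only [h0, if_false]
      rw [ih (n / 10) (Nat.digitChar (n % 10) :: acc), ih (n / 10) [Nat.digitChar (n % 10)]]
      simp

lemma toDigitsCore_step (n : Nat) (acc : List Char) :
    Nat.toDigitsCore 10 (n + 1) n acc =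
      if n / 10 = 0 then Nat.digitChar (n % 10) :: acc
      else Nat.toDigitsCore 10 n (n / 10) (Nat.digitChar (n % 10) :: acc) := by
  simp only [Nat.toDigitsCore]

lemma toDigits_small {n : Nat} (h : n ≤ 9) : Nat.toDigits 10 n = [Nat.digitChar n] := by
  unfold Nat.toDigits
  rw [toDigitsCore_step n [], if_pos (by omega), Nat.mod_eq_of_lt (by omega)]

lemma toDigits_append {n : Nat} (h : 10 ≤ n) :
    Nat.toDigits 10 n = Nat.toDigits 10 (n / 10) ++ [Nat.digitChar (n % 10)] := by
  have h0 : ¬ n / 10 = 0 := by omega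
  have hd : n / 10 < n := Nat.div_lt_self (by omega) (by omega)
  unfold Nat.toDigits
  rw [toDigitsCore_step n [], if_neg h0]
  rw [toDigitsCore_fuel n (n / 10) _ (by omega)]
  rw [toDigitsCore_acc (n / 10 + 1) (n / 10) [Nat.digitChar (n % 10)]]

-- leading two characters of a number ≥ 10
lemma toDigits_two : ∀ {n : Nat}, 10 ≤ n →
    ∃ a b t, Nat.toDigits 10 n = a :: b :: t ∧ '1' ≤ a ∧ fshDigit a ∧ fshDigit b ∧
      10 * fshVal a + fshVal b ≤ (n : Int) := by
  intro n
  induction n using Nat.strong_induction_on with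
  | _ n ih =>
    intro h
    rw [toDigits_append h]
    have hm9 : n % 10 ≤ 9 := by omega
    by_cases h2 : n / 10 ≤ 9
    · rw [toDigits_small h2]
      refine ⟨_, _, [], rfl, digitChar_ge_one (by omega) h2, digitChar_digit h2,
        digitChar_digit hm9, ?_⟩
      unfold fshVal
      rw [digitChar_toNat h2, digitChar_toNat hm9]
      push_cast
      omega
    · obtain ⟨a, b, t, heq, h1, ha, hb, hvle⟩ :=
        ih (n / 10) (Nat.div_lt_self (by omega) (by omega)) (by omega)
      refine ⟨a, b, t ++ [Nat.digitChar (n % 10)], by rw [heq]; simp, h1, ha, hb, ?_⟩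
      have hds : n / 10 ≤ n := Nat.div_le_self n 10
      have hcast : ((n / 10 : Nat) : Int) ≤ (n : Int) := by exact_mod_cast hds
      omega

lemma toChars_natCast (n : Nat) : PySem.Int.toChars (n : Int) = Nat.toDigits 10 n := by
  simp [PySem.Int.toChars]

-- an infix a::b::t yields an adjacent pair
lemma infix_pair {cs : List Char} {a b : Char} {t : List Char}
    (h : (a :: b :: t) <:+: cs) : (a, b) ∈ cs.zip cs.tail := by
  obtain ⟨u, v, huv⟩ := h
  have huv' : u ++ ((a :: b :: t) ++ v) = cs := by rw [← List.append_assoc]; exact huv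
  apply pair_mem_zip cs u.length
  · rw [← huv', List.getElem?_append_right (Nat.le_refl _)]
    simp
  · rw [← huv', List.getElem?_append_right (by omega)]
    simp

-- an adjacent pair yields an infix
lemma pair_infix {cs : List Char} {a b : Char} (h : (a, b) ∈ cs.zip cs.tail) :
    [a, b] <:+: cs := by
  obtain ⟨k, ha, hb⟩ := zip_mem_pair cs a b h
  have hk1 : k + 1 < cs.length := (List.getElem?_eq_some_iff.mp hb).1
  have hk : k < cs.length := by omega
  have hdrop : cs.drop k = a :: b :: cs.drop (k + 2) := by
    rw [List.drop_eq_getElem_cons hk, List.drop_eq_getElem_cons hk1]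
    obtain ⟨_, e1⟩ := List.getElem?_eq_some_iff.mp ha
    obtain ⟨_, e2⟩ := List.getElem?_eq_some_iff.mp hb
    rw [e1, e2]
  have hpre : [a, b] <+: cs.drop k := ⟨cs.drop (k + 2), by rw [hdrop]; rfl⟩
  exact hpre.isInfix.trans (cs.drop_suffix k).isInfix

lemma fshHasPair_mono {cs : List Char} {h : Int} (hp : fshHasPair cs h = false) :
    fshHasPair cs (h - 1) = false := by
  unfold fshHasPair at *
  rw [List.any_eq_false] at hp ⊢
  intro p hpm
  have h2 := hp p hpm
  simp only [decide_eq_true_eq] at h2 ⊢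
  intro hc
  exact h2 ⟨hc.1, hc.2.1, hc.2.2.1, hc.2.2.2.1, by omega⟩

lemma fshHasPair_ten (cs : List Char) : fshHasPair cs 10 = false := by
  unfold fshHasPair
  rw [List.any_eq_false]
  intro p _
  simp only [decide_eq_true_eq]
  rintro ⟨h1, _, h3, _, h5⟩
  rw [char_le_iff] at h1 h3
  have e1 : ('1' : Char).toNat = 49 := rfl
  have e0 : ('0' : Char).toNat = 48 := rfl
  omega

-- MAIN: descending search equals the linear-scan spec when no two-digit hit exists
lemma fshMain : ∀ (n : Nat) (s : String), fshHasPair s.toList (n : Int) = false →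
    fshLoop2 s (PySem.List.pyRange ((n : Int) - 1) (-1) (-1)) = fshSpec (n : Int) s.toList 0 := by
  intro n
  induction n with
  | zero =>
    intro s _
    rw [PySem.List.pyRange_neg_one_eq_nil (by norm_num)]
    rw [fshSpec_nonpos _ _ _ (by norm_num)]
    rfl
  | succ n ih =>
    intro s hnp
    have hc : ((n + 1 : ℕ) : Int) - 1 = (n : Int) := by push_cast; ring
    rw [hc, PySem.List.pyRange_neg_one_cons (by omega)]
    simp only [fshLoop2]
    by_cases hf : PySem.Str.find s (PySem.Int.toStr (n : Int)) ≠ -1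
    · rw [if_pos hf]
      have hinfix : (Nat.toDigits 10 n) <:+: s.toList := by
        have h1 := (PySem.Str.find_eq_neg_one_iff s (PySem.Int.toStr (n : Int)))
        have h2 : (PySem.Int.toStr (n : Int)).toList <:+: s.toList := by
          by_contra hcon
          exact hf (h1.mpr hcon)
        rwa [PySem.Int.toList_toStr, toChars_natCast] at h2
      by_cases h10 : 10 ≤ n
      · exfalso
        obtain ⟨a, b, t, heq, h1, ha, hb, hvle⟩ := toDigits_two h10
        have hmem : (a, b) ∈ s.toList.zip s.toList.tail := infix_pair (heq ▸ hinfix)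
        have htrue : fshHasPair s.toList ((n + 1 : ℕ) : Int) = true := by
          unfold fshHasPair
          rw [List.any_eq_true]
          refine ⟨(a, b), hmem, ?_⟩
          rw [decide_eq_true_eq]
          refine ⟨h1, ha.2, hb.1, hb.2, ?_⟩
          unfold fshVal at hvle
          push_cast
          omega
        rw [hnp] at htrue
        cases htrue
      · have hsm : Nat.toDigits 10 n = [Nat.digitChar n] := toDigits_small (by omega)
        have hmem : Nat.digitChar n ∈ s.toList := by
          rw [hsm] at hinfix
          exact hinfix.subset (List.mem_singleton.mpr rfl)
        have hdig := digitChar_digit (show n ≤ 9 by omega)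
        have hvc : fshVal (Nat.digitChar n) = ((n + 1 : ℕ) : Int) - 1 := by
          unfold fshVal
          rw [digitChar_toNat (by omega)]
          push_cast; ring
        rw [fshSpec_top _ _ hdig hvc s.toList 0 hmem]
        have hfind : PySem.Str.find s (PySem.Int.toStr (n : Int)) = (s.toList.idxOf (Nat.digitChar n) : Int) := by
          rw [show PySem.Str.find s (PySem.Int.toStr (n : Int)) = PySem.Chars.find s.toList (PySem.Int.toStr (n : Int)).toList from by simp [PySem.Str.find]]
          rw [PySem.Int.toList_toStr, toChars_natCast, hsm]
          exact find_singleton _ _ hmem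
        rw [hfind]
        push_cast
        simp
    · rw [if_neg hf]
      have hnoval : ∀ c ∈ s.toList, fshDigit c → fshVal c ≠ ((n + 1 : ℕ) : Int) - 1 := by
        intro c hm hd hv
        apply hf
        have hn9 : n ≤ 9 := by
          have := fshVal_bounds hd
          push_cast at hv
          omega
        have hceq : c = Nat.digitChar n := by
          apply char_eq_of_toNat_eq
          rw [digitChar_toNat (by omega)]
          unfold fshVal at hv
          push_cast at hv
          omega
        rw [ne_eq, PySem.Str.find_eq_neg_one_iff]
        intro hcon
        apply hcon
        rw [PySem.Int.toList_toStr, toChars_natCast, toDigits_small (by omega), ← hceq]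
        obtain ⟨l1, l2, hsplit⟩ := List.append_of_mem hm
        exact ⟨l1, l2, by rw [hsplit]; simp⟩
      rw [fshSpec_step _ _ _ hnoval]
      have hc2 : ((n + 1 : ℕ) : Int) - 1 = (n : Int) := by push_cast; ring
      rw [hc2]
      exact ih s (by
        have hmono := fshHasPair_mono (h := ((n + 1 : ℕ) : Int)) hnp
        rwa [hc2] at hmono)

lemma fshLoop1_eq (s : String) (index : Int) (l : List Int) :
    fshLoop1 s index l =
      (fshLoop2 (PySem.Str.slice s (some (index + 1)) none) l).map
        (fun p => (p.1, p.2 + index + 1)) := by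
  induction l with
  | nil => rfl
  | cons j js ih =>
    simp only [fshLoop1, fshLoop2]
    by_cases hf : PySem.Str.find (PySem.Str.slice s (some (index + 1)) none) (PySem.Int.toStr j) ≠ -1
    · rw [if_pos hf, if_pos hf]; rfl
    · rw [if_neg hf, if_neg hf]; exact ih

-- descending search returns some hit ≥ v when v is found and in range
lemma fshLoop2_ge : ∀ (n : Nat) (s : String) (v : Int), 0 ≤ v → v ≤ (n : Int) - 1 →
    PySem.Str.find s (PySem.Int.toStr v) ≠ -1 →
    ∃ j p, fshLoop2 s (PySem.List.pyRange ((n : Int) - 1) (-1) (-1)) = some (j, p) ∧ v ≤ j := by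
  intro n
  induction n with
  | zero => intro s v h0 hv _; simp at hv; omega
  | succ n ih =>
    intro s v h0 hv hf
    have hc : ((n + 1 : ℕ) : Int) - 1 = (n : Int) := by push_cast; ring
    rw [hc, PySem.List.pyRange_neg_one_cons (by omega)]
    simp only [fshLoop2]
    by_cases hfn : PySem.Str.find s (PySem.Int.toStr (n : Int)) ≠ -1
    · rw [if_pos hfn]
      refine ⟨(n : Int), _, rfl, by rw [hc] at hv; omega⟩
    · rw [if_neg hfn]
      have hvn : v ≠ (n : Int) := by
        intro he; subst he; exact hfn hf
      exact ih s v h0 (by rw [hc] at hv; omega) hf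

-- ===== VERDICT =====
theorem find_second_highest_spec : Claim_unchanged_find_second_highest := by
  intro s highest index _ hnd
  show find_second_highest s highest index = find_second_highest_alt s highest index
  simp only [find_second_highest, find_second_highest_alt]
  by_cases hidx : index = PySem.Str.len s - 1
  · have hni : ¬ (index ≠ PySem.Str.len s - 1) := by simpa using hidx
    rw [if_neg hni, if_neg hni]
    have hnp : fshHasPair s.toList highest = false := by
      cases hfp : fshHasPair s.toList highest
      · rfl
      · exact absurd ⟨hidx, hfp⟩ hnd
    by_cases hpos : 0 ≤ highest
    · obtain ⟨n, rfl⟩ : ∃ n : Nat, highest = (n : Int) :=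
        ⟨highest.toNat, (Int.toNat_of_nonneg hpos).symm⟩
      rw [fshMain n s hnp, foldl_fshBest2]
      cases fshSpec (n : Int) s.toList 0 <;> rfl
    · rw [PySem.List.pyRange_neg_one_eq_nil (by omega), foldl_fshBest2,
        fshSpec_nonpos _ _ _ (by omega)]
      rfl
  · rw [if_pos hidx, if_pos hidx]
    rw [fshLoop1_eq]
    have hm := fshMain 10 (PySem.Str.slice s (some (index + 1)) none) (fshHasPair_ten _)
    norm_num at hm
    rw [hm]
    rw [PySem.List.foldl_congr_mem _ fshBest1 (fshBest2 10) none (fun acc x _ => fshBest1_eq acc x)]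
    rw [foldl_fshBest2]
    have hbr : (PySem.Str.slice s (some (index + 1)) none).toList
        = PySem.List.slice s.toList (some (index + 1)) none := by simp
    rw [hbr]
    cases fshSpec 10 (PySem.List.slice s.toList (some (index + 1)) none) 0 <;> rfl

theorem find_second_highest_changed : Claim_changed_find_second_highest := by
  unfold Claim_changed_find_second_highest; decide

theorem find_second_highest_tight : Claim_exact_find_second_highest := by
  intro s highest index _ hd heq
  obtain ⟨hidx, hp⟩ := hd
  simp only [find_second_highest, find_second_highest_alt] at heq
  have hni : ¬ (index ≠ PySem.Str.len s - 1) := by simpa using hidx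
  rw [if_neg hni, if_neg hni] at heq
  unfold fshHasPair at hp
  rw [List.any_eq_true] at hp
  obtain ⟨q, hqm, hcond⟩ := hp
  rw [decide_eq_true_eq] at hcond
  obtain ⟨h1, h9, hb0, hb9, hlt⟩ := hcond
  rw [char_le_iff] at h1 h9 hb0 hb9
  have e1 : ('1' : Char).toNat = 49 := rfl
  have e9 : ('9' : Char).toNat = 57 := rfl
  have e0 : ('0' : Char).toNat = 48 := rfl
  set v : Int := 10 * ((q.1.toNat : Int) - 48) + ((q.2.toNat : Int) - 48) with hvdef
  have hv10 : 10 ≤ v ∧ v ≤ 99 := by omega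
  have htc : PySem.Int.toChars v = [q.1, q.2] := by
    have hvt : v = ((v.toNat : Nat) : Int) := by omega
    have hdiv : v.toNat / 10 = q.1.toNat - 48 := by omega
    have hmod : v.toNat % 10 = q.2.toNat - 48 := by omega
    rw [hvt, toChars_natCast, toDigits_append (by omega), toDigits_small (by omega)]
    rw [hdiv, hmod]
    have hq1 : Nat.digitChar (q.1.toNat - 48) = q.1 :=
      char_eq_of_toNat_eq (by rw [digitChar_toNat (by omega)]; omega)
    have hq2 : Nat.digitChar (q.2.toNat - 48) = q.2 :=
      char_eq_of_toNat_eq (by rw [digitChar_toNat (by omega)]; omega)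
    rw [hq1, hq2]
    rfl
  have hinfix : [q.1, q.2] <:+: s.toList := pair_infix hqm
  have hfind : PySem.Str.find s (PySem.Int.toStr v) ≠ -1 := by
    rw [ne_eq, PySem.Str.find_eq_neg_one_iff, PySem.Int.toList_toStr, htc]
    simpa using hinfix
  have hpos : 0 ≤ highest := by omega
  obtain ⟨n, rfl⟩ : ∃ n : Nat, highest = (n : Int) :=
    ⟨highest.toNat, (Int.toNat_of_nonneg hpos).symm⟩
  obtain ⟨j, p, hA, hjv⟩ := fshLoop2_ge n s v (by omega) (by omega) hfind
  rw [hA, foldl_fshBest2] at heq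
  cases hr : fshSpec (n : Int) s.toList 0 with
  | none => rw [hr] at heq; simp [fshCombine] at heq
  | some b =>
    have hbd := fshSpec_bounds _ _ _ _ hr
    rw [hr] at heq
    simp only [fshCombine] at heq
    have hj : j = b.1 := by
      have h2 := Option.some_inj.mp heq
      exact congrArg Prod.fst h2
    omega
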